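-- pv_equiv track=rewrite | github.com/Goulustis/evimo-formatter | format_col_set.py | split_and_find_indices
-- ===== SOURCE A (Python) =====
-- def split_and_find_indices(nums, num_parts):
--     part_size = len(nums) // num_parts  # Determine the size of each part
--     indices = []  # To store the original indices of the smallest elements in each part
--
--     for part in range(num_parts):
--         start_index = part * part_size
--         # Handle the last part which might contain the remaining elements
--         end_index = start_index + part_size if part < num_parts - 1 else len(nums)
--
--         # Extract the part
--         current_part = nums[start_index:end_index]
--
--         # Find the smallest element and its index in the current part
--         min_index_in_part = current_part.index(min(current_part))
--
--         # Calculate the original index in the full list and add it to the result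
--         original_index = start_index + min_index_in_part
--         indices.append(original_index)
--
--     return indices
-- ===== SOURCE B (Python) =====
-- def split_and_find_indices(nums, num_parts):
--     part_size = len(nums) // num_parts  # same split rule as before (ZeroDivisionError for num_parts == 0)
--     last = num_parts - 1
--     best = [None] * num_parts  # per part: (value, original index) of its first minimum so far
--     for i, v in enumerate(nums):
--         p = i // part_size if i < last * part_size else last
--         if best[p] is None or v < best[p][0]:
--             best[p] = (v, i)
--     return [b[1] for b in best]
-- ===== Notes on version B (the rewrite author's own statement) =====
-- stated objective: alternative
-- what changed: Instead of looping over parts and, per part, slicing the list and running min() followed by .index(), B makes one flat forward pass over enumerate(nums), maps each index to its part arithmetically, and keeps a per-part (best value, best index) bucket updated on strict decrease so the first minimum wins.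
-- outside the precondition, e.g. on split_and_find_indices([5, 3], -1): A returns [], B raises IndexError
import Mathlib
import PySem

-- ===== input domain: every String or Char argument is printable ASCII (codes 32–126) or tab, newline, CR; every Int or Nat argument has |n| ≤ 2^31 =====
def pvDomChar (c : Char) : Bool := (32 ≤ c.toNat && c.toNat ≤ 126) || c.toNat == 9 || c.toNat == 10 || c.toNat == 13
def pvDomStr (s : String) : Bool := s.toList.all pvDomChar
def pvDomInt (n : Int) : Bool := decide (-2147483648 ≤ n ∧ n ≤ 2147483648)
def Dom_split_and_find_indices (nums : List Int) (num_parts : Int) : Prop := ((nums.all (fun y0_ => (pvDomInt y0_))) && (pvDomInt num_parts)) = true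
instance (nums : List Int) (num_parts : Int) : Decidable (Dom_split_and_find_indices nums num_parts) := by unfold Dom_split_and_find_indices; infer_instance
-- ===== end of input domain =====

-- B replaces A's per-part slice + min() + .index() passes by one flat forward pass over
-- enumerate(nums) with per-part best-value/best-index buckets (alternative decomposition, same O(n) cost).


-- ===== PORT A =====
def split_and_find_indices (nums : List Int) (num_parts : Int) : List Int :=
  let part_size := PySem.Int.floordiv (nums.length : Int) num_parts
  (PySem.List.pyRange 0 num_parts 1).foldl
    (fun indices part =>
      let start_index := part * part_size
      let end_index := if part < num_parts - 1 then start_index + part_size else (nums.length : Int)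
      let current_part := PySem.List.slice nums (some start_index) (some end_index)
      -- current_part.index(min(current_part)); none = ValueError on an empty part, excluded by Pre_
      let min_index_in_part : Int :=
        match (PySem.List.min? current_part (fun y => y)).bind
                (fun m => PySem.List.index? current_part m) with
        | some j => (j : Int)
        | none => 0
      indices ++ [start_index + min_index_in_part])
    []

-- ===== PORT B =====
def split_and_find_indices_alt (nums : List Int) (num_parts : Int) : List Int :=
  let part_size := PySem.Int.floordiv (nums.length : Int) num_parts
  let last := num_parts - 1
  let best0 : List (Option (Int × Int)) := List.replicate num_parts.toNat none
  let best := (PySem.List.enumerate nums 0).foldl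
    (fun best iv =>
      let i := iv.1
      let v := iv.2
      let p := if i < last * part_size then PySem.Int.floordiv i part_size else last
      -- best[p]; an out-of-range p is a Python IndexError, excluded by Pre_
      match (PySem.List.pyGet? best p).getD none with
      | none => PySem.List.pySetD best p (some (v, i))
      | some b => if v < b.1 then PySem.List.pySetD best p (some (v, i)) else best)
    best0
  -- [b[1] for b in best]; b = None would be a Python TypeError, excluded by Pre_
  best.map (fun b => (Option.map (fun q => q.2) b).getD 0)

-- ===== PRECONDITION & SPEC =====
-- Pre_ excludes (i) inputs where A raises: num_parts == 0 (ZeroDivisionError) and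
-- 1 <= num_parts with len(nums) < num_parts (some part is empty, min([]) raises ValueError);
-- and (ii) negative num_parts with nonempty nums, where A returns [] only by accident of
-- range() over a negative count while B's natural flat pass raises IndexError.
def Pre_split_and_find_indices (nums : List Int) (num_parts : Int) : Prop :=
  (1 ≤ num_parts ∧ num_parts ≤ (nums.length : Int)) ∨ (num_parts < 0 ∧ nums = [])
instance (nums : List Int) (num_parts : Int) : Decidable (Pre_split_and_find_indices nums num_parts) := by
  unfold Pre_split_and_find_indices; infer_instance

def pvWitness_split_and_find_indices : List Int × Int := ([3, 1, 2, 0], 2)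

def Spec_split_and_find_indices (nums : List Int) (num_parts : Int) (out : List Int) : Prop := out = split_and_find_indices_alt nums num_parts
instance (nums : List Int) (num_parts : Int) (out : List Int) : Decidable (Spec_split_and_find_indices nums num_parts out) := by unfold Spec_split_and_find_indices; infer_instance

-- ===== CLAIM (what is proved, stated in full; the proofs are below) =====
def Claim_equal_split_and_find_indices : Prop := ∀ (nums : List Int) (num_parts : Int), Dom_split_and_find_indices nums num_parts → Pre_split_and_find_indices nums num_parts → Spec_split_and_find_indices nums num_parts (split_and_find_indices nums num_parts)

-- ===== LEMMAS AND PROOFS =====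

-- first minimum of a list with its index: the common reference of both per-part computations
def pvFirstMin : List Int → Option (Int × Nat)
  | [] => none
  | x :: t =>
    match pvFirstMin t with
    | none => some (x, 0)
    | some (v, j) => if x ≤ v then some (x, 0) else some (v, j + 1)

-- B's bucket update on one (index, value) pair of the enumerate stream
def pvUpd (o : Option (Int × Int)) (iv : Int × Int) : Option (Int × Int) :=
  match o with
  | none => some (iv.2, iv.1)
  | some b => if iv.2 < b.1 then some (iv.2, iv.1) else b

-- B's loop body with the part classifier abstracted
def pvStep (pf : Int → Int) (best : List (Option (Int × Int))) (iv : Int × Int) :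
    List (Option (Int × Int)) :=
  let p := pf iv.1
  match (PySem.List.pyGet? best p).getD none with
  | none => PySem.List.pySetD best p (some (iv.2, iv.1))
  | some b => if iv.2 < b.1 then PySem.List.pySetD best p (some (iv.2, iv.1)) else best

-- the Nat-level part classifier and A's per-part body
def pvClass (m' s k : Nat) : Nat := if k < (m' - 1) * s then k / s else m' - 1

def pvGA (nums : List Int) (np : Int) (part : Int) : Int :=
  let part_size := PySem.Int.floordiv (nums.length : Int) np
  let start_index := part * part_size
  let end_index := if part < np - 1 then start_index + part_size else (nums.length : Int)
  let current_part := PySem.List.slice nums (some start_index) (some end_index)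
  start_index +
    (match (PySem.List.min? current_part (fun y => y)).bind
        (fun m => PySem.List.index? current_part m) with
      | some j => (j : Int)
      | none => 0)

def pvPF (nums : List Int) (np : Int) : Int → Int := fun i =>
  if i < (np - 1) * PySem.Int.floordiv (nums.length : Int) np
  then PySem.Int.floordiv i (PySem.Int.floordiv (nums.length : Int) np)
  else np - 1

def pvFB (b : Option (Int × Int)) : Int := (Option.map (fun q => q.2) b).getD 0

lemma pvA_eq_map (nums : List Int) (np : Int) :
    split_and_find_indices nums np = (PySem.List.pyRange 0 np 1).map (pvGA nums np) := by
  show (PySem.List.pyRange 0 np 1).foldl (fun indices part => indices ++ [pvGA nums np part]) [] = _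
  rw [PySem.List.foldl_append_singleton_eq_map, List.nil_append]

lemma pvB_eq (nums : List Int) (np : Int) :
    split_and_find_indices_alt nums np =
      ((PySem.List.enumerate nums 0).foldl (pvStep (pvPF nums np))
        (List.replicate np.toNat none)).map pvFB := rfl

lemma pvFirstMin_eq_none (c : List Int) : pvFirstMin c = none ↔ c = [] := by
  cases c with
  | nil => simp [pvFirstMin]
  | cons x t => simp only [pvFirstMin]; split <;> (simp; try (split_ifs <;> simp))

lemma pvFoldMin (t : List Int) : ∀ a b : Int, t.foldl min (min a b) = min a (t.foldl min b) := by
  induction t with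
  | nil => intro a b; rfl
  | cons y t ih =>
    intro a b
    simp only [List.foldl_cons]
    rw [min_assoc, ih]

lemma pvFoldMinHead (t : List Int) (x w : Int)
    (hmin : PySem.List.min? t (fun y => y) = some w) : t.foldl min x = min x w := by
  rcases t with _ | ⟨y, t'⟩
  · simp [PySem.List.min?] at hmin
  · rw [PySem.List.min?_id_cons] at hmin
    have hw : t'.foldl min y = w := Option.some_injective _ hmin
    simp only [List.foldl_cons]
    rw [← hw, ← pvFoldMin]

lemma pvASeg (c : List Int) : ∀ (v : Int) (j : Nat), pvFirstMin c = some (v, j) →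
    PySem.List.min? c (fun y => y) = some v ∧ PySem.List.index? c v = some j := by
  induction c with
  | nil => intro v j h; simp [pvFirstMin] at h
  | cons x t ih =>
    intro v j h
    rcases ht : pvFirstMin t with _ | ⟨w, k⟩
    · have h0 : t = [] := (pvFirstMin_eq_none t).mp ht
      subst h0
      simp only [pvFirstMin, Option.some.injEq, Prod.mk.injEq] at h
      obtain ⟨h1, h2⟩ := h
      subst h1; subst h2
      exact ⟨by simp [PySem.List.min?_id_cons], PySem.List.index?_cons_self _ _⟩
    · obtain ⟨hmin, hidx⟩ := ih w k ht
      simp only [pvFirstMin, ht] at h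
      by_cases hxw : x ≤ w
      · simp only [if_pos hxw, Option.some.injEq, Prod.mk.injEq] at h
        obtain ⟨h1, h2⟩ := h
        subst h1; subst h2
        refine ⟨?_, PySem.List.index?_cons_self _ _⟩
        rw [PySem.List.min?_id_cons, pvFoldMinHead t x w hmin, min_eq_left hxw]
      · simp only [if_neg hxw, Option.some.injEq, Prod.mk.injEq] at h
        obtain ⟨h1, h2⟩ := h
        subst h1; subst h2
        constructor
        · rw [PySem.List.min?_id_cons, pvFoldMinHead t x w hmin,
            min_eq_right (le_of_lt (lt_of_not_ge hxw))]
        · rw [PySem.List.index?_cons_of_ne _ (by omega), hidx]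
          rfl

lemma pvBSeg (c : List Int) : ∀ (off : Int) (b : Int × Int),
    (PySem.List.enumerate c off).foldl pvUpd (some b) =
      some (match pvFirstMin c with
            | none => b
            | some (v, j) => if v < b.1 then (v, off + (j : Int)) else b) := by
  induction c with
  | nil => intro off b; simp [PySem.List.enumerate_nil, pvFirstMin]
  | cons x t ih =>
    intro off b
    rw [PySem.List.enumerate_cons]
    simp only [List.foldl_cons]
    have hupd : pvUpd (some b) (off, x) = some (if x < b.1 then (x, off) else b) := by
      simp only [pvUpd]; split_ifs <;> rfl
    rw [hupd, ih]
    rcases ht : pvFirstMin t with _ | ⟨v, j⟩ <;>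
      simp only [pvFirstMin, ht] <;>
      split_ifs <;>
      (try simp_all) <;>
      (try split_ifs) <;>
      (try simp_all [Prod.ext_iff]) <;>
      omega

lemma pvBSeg0 (c : List Int) (off : Int) (hc : c ≠ []) :
    (PySem.List.enumerate c off).foldl pvUpd none =
      (pvFirstMin c).map (fun q => (q.1, off + (q.2 : Int))) := by
  rcases c with _ | ⟨x, t⟩
  · exact absurd rfl hc
  · rw [PySem.List.enumerate_cons]
    simp only [List.foldl_cons]
    have h0 : pvUpd none (off, x) = some (x, off) := rfl
    rw [h0, pvBSeg]
    rcases ht : pvFirstMin t with _ | ⟨v, j⟩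
    · have h1 : t = [] := (pvFirstMin_eq_none t).mp ht
      subst h1
      simp [pvFirstMin]
    · simp only [pvFirstMin, ht]
      split_ifs <;> simp_all [Prod.ext_iff] <;> omega

lemma pvStep_eq (pf : Int → Int) (best : List (Option (Int × Int))) (iv : Int × Int)
    (p : Nat) (hp : pf iv.1 = (p : Int)) (hlt : p < best.length) :
    pvStep pf best iv = best.set p (pvUpd (best.getD p none) iv) := by
  simp only [pvStep, hp, PySem.List.pyGet?_natCast, PySem.List.pySetD_natCast, pvUpd]
  rw [List.getElem?_eq_getElem hlt]
  simp only [Option.getD_some, List.getD_eq_getElem?_getD, List.getElem?_eq_getElem hlt,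
    Option.getD_some]
  rcases hb : best[p] with _ | b
  · rfl
  · show (if iv.2 < b.1 then best.set p (some (iv.2, iv.1)) else best) = _
    have hm : (match (some b : Option (Int × Int)) with
        | none => some (iv.2, iv.1)
        | some c => if iv.2 < c.1 then some (iv.2, iv.1) else some c) =
        (if iv.2 < b.1 then some (iv.2, iv.1) else some b) := rfl
    rw [hm]
    split_ifs with h
    · rfl
    · conv_lhs => rw [← List.set_getElem_self hlt]
      rw [hb]

lemma pvStepFold (pf : Int → Int) :
    ∀ (pairs : List (Int × Int)) (best : List (Option (Int × Int))),
    (∀ iv ∈ pairs, ∃ p : Nat, pf iv.1 = (p : Int) ∧ p < best.length) →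
    (pairs.foldl (pvStep pf) best).length = best.length ∧
    ∀ q : Nat, q < best.length →
      (pairs.foldl (pvStep pf) best).getD q none =
        (pairs.filter (fun iv => pf iv.1 == (q : Int))).foldl pvUpd (best.getD q none) := by
  intro pairs
  induction pairs with
  | nil => intro best h; exact ⟨rfl, fun q hq => rfl⟩
  | cons iv t ih =>
    intro best h
    obtain ⟨p, hp, hplen⟩ := h iv (by simp)
    have hstep : pvStep pf best iv = best.set p (pvUpd (best.getD p none) iv) :=
      pvStep_eq pf best iv p hp hplen
    have hlen' : (best.set p (pvUpd (best.getD p none) iv)).length = best.length :=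
      List.length_set ..
    have hrec := ih (best.set p (pvUpd (best.getD p none) iv))
      (fun jv hjv => by
        obtain ⟨r, hr, hrlen⟩ := h jv (by simp [hjv])
        exact ⟨r, hr, by rw [hlen']; exact hrlen⟩)
    refine ⟨?_, ?_⟩
    · simp only [List.foldl_cons, hstep]
      rw [hrec.1, hlen']
    · intro q hq
      simp only [List.foldl_cons, hstep, List.filter_cons]
      rw [hrec.2 q (by rw [hlen']; exact hq)]
      by_cases hpq : p = q
      · subst hpq
        have hbeq : (pf iv.1 == (p : Int)) = true := by simp [hp]
        simp only [hbeq, if_true, List.foldl_cons]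
        congr 1
        simp only [List.getD_eq_getElem?_getD, List.getElem?_set_self hplen, Option.getD_some]
      · have hbeq : (pf iv.1 == (q : Int)) = false := by
          simp [hp]; omega
        simp only [hbeq, Bool.false_eq_true, if_false]
        congr 1
        simp only [List.getD_eq_getElem?_getD, List.getElem?_set_ne hpq]

-- arithmetic facts about the part classifier and the part boundaries
lemma pvClassFacts (m' s N p : Nat) (hm1 : 1 ≤ m') (hs1 : 1 ≤ s) (hsm : m' * s ≤ N)
    (hp : p < m') :
    p * s ≤ N ∧ (if p + 1 = m' then N else (p + 1) * s) ≤ N ∧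
    p * s < (if p + 1 = m' then N else (p + 1) * s) ∧
    (∀ k, k < p * s → pvClass m' s k ≠ p) ∧
    (∀ k, p * s ≤ k → k < (if p + 1 = m' then N else (p + 1) * s) → pvClass m' s k = p) ∧
    (∀ k, (if p + 1 = m' then N else (p + 1) * s) ≤ k → k < N → pvClass m' s k ≠ p) := by
  have hsucc : (m' - 1) * s + s = m' * s := by
    have h1 : (m' - 1 + 1) * s = (m' - 1) * s + s := Nat.succ_mul _ _
    have h2 : m' - 1 + 1 = m' := by omega
    rw [h2] at h1; omega
  have hpsucc : (p + 1) * s = p * s + s := Nat.succ_mul _ _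
  have hmul1 : p * s ≤ (m' - 1) * s := Nat.mul_le_mul_right s (by omega)
  by_cases hpm : p + 1 = m'
  · have hpe : m' - 1 = p := by omega
    rw [hpe] at hsucc hmul1
    simp only [if_pos hpm]
    refine ⟨by omega, le_refl N, by omega, ?_, ?_, ?_⟩
    · intro k hk
      unfold pvClass
      rw [hpe, if_pos hk]
      have hd := (Nat.div_lt_iff_lt_mul (by omega : 0 < s)).mpr hk
      omega
    · intro k hk1 _
      unfold pvClass
      rw [hpe, if_neg (by omega)]
    · intro k hk1 hk2
      omega
  · have hmul2 : (p + 1) * s ≤ (m' - 1) * s := Nat.mul_le_mul_right s (by omega)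
    simp only [if_neg hpm]
    refine ⟨by omega, by omega, by omega, ?_, ?_, ?_⟩
    · intro k hk
      unfold pvClass
      rw [if_pos (by omega)]
      have hd := (Nat.div_lt_iff_lt_mul (by omega : 0 < s)).mpr (by omega : k < p * s)
      omega
    · intro k hk1 hk2
      unfold pvClass
      rw [if_pos (by omega)]
      exact Nat.div_eq_of_lt_le hk1 hk2
    · intro k hk1 hk2
      unfold pvClass
      split_ifs with h
      · have hd := (Nat.le_div_iff_mul_le (by omega : 0 < s)).mpr hk1
        omega
      · omega

-- the filtered enumerate stream of an index interval is the enumerate of the slice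
lemma pvFilterInterval (nums : List Int) (pf : Int → Int) (p : Nat) (a b : Nat)
    (haN : a ≤ nums.length) (hbN : b ≤ nums.length) (hab : a ≤ b)
    (hlt : ∀ k, k < a → (pf (k : Int) == (p : Int)) = false)
    (hin : ∀ k, a ≤ k → k < b → k < nums.length → (pf (k : Int) == (p : Int)) = true)
    (hgt : ∀ k, b ≤ k → k < nums.length → (pf (k : Int) == (p : Int)) = false) :
    (PySem.List.enumerate nums 0).filter (fun iv => pf iv.1 == (p : Int)) =
      PySem.List.enumerate ((nums.drop a).take (b - a)) ((a : Nat) : Int) := by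
  have hdecomp : nums = nums.take a ++ ((nums.drop a).take (b - a) ++ nums.drop b) := by
    have h1 : (nums.drop a).take (b - a) ++ (nums.drop a).drop (b - a) = nums.drop a :=
      List.take_append_drop _ _
    have h2 : (nums.drop a).drop (b - a) = nums.drop b := by
      rw [List.drop_drop]
      congr 1
      omega
    rw [h2] at h1
    rw [h1, List.take_append_drop]
  have hlen1 : (nums.take a).length = a := by
    simp [List.length_take]; omega
  have hlen2 : ((nums.drop a).take (b - a)).length = b - a := by
    simp [List.length_take, List.length_drop]; omega
  have hlen3 : (nums.drop b).length = nums.length - b := List.length_drop ..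
  conv_lhs => rw [hdecomp]
  rw [PySem.List.enumerate_append, PySem.List.enumerate_append,
    List.filter_append, List.filter_append]
  have h1 : (PySem.List.enumerate (nums.take a) 0).filter
      (fun iv => pf iv.1 == (p : Int)) = [] := by
    rw [List.filter_eq_nil_iff]
    intro iv hiv
    obtain ⟨k, hk, rfl⟩ := (PySem.List.mem_enumerate_iff _ _ _).mp hiv
    rw [hlen1] at hk
    simp only [zero_add]
    simp [hlt k hk]
  have h2 : (PySem.List.enumerate ((nums.drop a).take (b - a))
      (0 + (nums.take a).length)).filter (fun iv => pf iv.1 == (p : Int)) =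
      PySem.List.enumerate ((nums.drop a).take (b - a)) (0 + (nums.take a).length) := by
    rw [List.filter_eq_self]
    intro iv hiv
    obtain ⟨k, hk, rfl⟩ := (PySem.List.mem_enumerate_iff _ _ _).mp hiv
    rw [hlen2] at hk
    have hcast : (0 : Int) + (nums.take a).length + (k : Int) = ((a + k : Nat) : Int) := by
      rw [hlen1]; push_cast; ring
    simp only [hcast]
    exact hin (a + k) (by omega) (by omega) (by omega)
  have h3 : (PySem.List.enumerate (nums.drop b)
      (0 + (nums.take a).length + ((nums.drop a).take (b - a)).length)).filter
      (fun iv => pf iv.1 == (p : Int)) = [] := by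
    rw [List.filter_eq_nil_iff]
    intro iv hiv
    obtain ⟨k, hk, rfl⟩ := (PySem.List.mem_enumerate_iff _ _ _).mp hiv
    rw [hlen3] at hk
    have hcast : (0 : Int) + (nums.take a).length +
        ((nums.drop a).take (b - a)).length + (k : Int) = ((b + k : Nat) : Int) := by
      rw [hlen1, hlen2]; push_cast; omega
    simp only [hcast]
    rw [hgt (b + k) (by omega) (by omega)]
    simp
  rw [h1, h2, h3, List.nil_append, List.append_nil]
  congr 1
  rw [hlen1]
  omega

-- ===== VERDICT (by name: the statement is the Claim_ definition above) =====
theorem split_and_find_indices_spec : Claim_equal_split_and_find_indices := by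
  unfold Claim_equal_split_and_find_indices
  intro nums num_parts hdom hpre
  unfold Spec_split_and_find_indices
  rcases hpre with ⟨hm1, hm2⟩ | ⟨hneg, hnil⟩
  · -- main case: 1 ≤ num_parts ≤ len(nums)
    obtain ⟨m', rfl⟩ : ∃ k : Nat, num_parts = (k : Int) :=
      ⟨num_parts.toNat, (Int.toNat_of_nonneg (by omega)).symm⟩
    have hm1' : 1 ≤ m' := by exact_mod_cast hm1
    have hm2' : m' ≤ nums.length := by exact_mod_cast hm2
    have hs1 : 1 ≤ nums.length / m' := (Nat.le_div_iff_mul_le (by omega)).mpr (by omega)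
    have hsm : m' * (nums.length / m') ≤ nums.length := Nat.mul_div_le ..
    have hps : PySem.Int.floordiv (nums.length : Int) (m' : Int) =
        ((nums.length / m' : Nat) : Int) := PySem.Int.floordiv_natCast ..
    have hpf : ∀ k : Nat, k < nums.length →
        pvPF nums (m' : Int) (k : Int) = ((pvClass m' (nums.length / m') k : Nat) : Int) := by
      intro k hk
      unfold pvPF pvClass
      rw [hps]
      have hc : ((m' : Int) - 1) = ((m' - 1 : Nat) : Int) := by omega
      rw [hc, ← Nat.cast_mul, PySem.Int.floordiv_natCast]
      by_cases h : k < (m' - 1) * (nums.length / m')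
      · rw [if_pos (by exact_mod_cast h), if_pos h]
      · rw [if_neg (by exact_mod_cast h), if_neg h]
    have hmem : ∀ iv ∈ PySem.List.enumerate nums 0, ∃ q : Nat,
        pvPF nums (m' : Int) iv.1 = (q : Int) ∧
        q < (List.replicate m' (none : Option (Int × Int))).length := by
      intro iv hiv
      obtain ⟨k, hk, rfl⟩ := (PySem.List.mem_enumerate_iff _ _ _).mp hiv
      refine ⟨pvClass m' (nums.length / m') k, ?_, ?_⟩
      · rw [show (0 : Int) + (k : Int) = (k : Int) by ring]
        exact hpf k hk
      · rw [List.length_replicate]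
        unfold pvClass
        split_ifs with h
        · have := (Nat.div_lt_iff_lt_mul (by omega : 0 < nums.length / m')).mpr h
          omega
        · omega
    have hfold := pvStepFold (pvPF nums (m' : Int)) (PySem.List.enumerate nums 0)
      (List.replicate m' none) hmem
    rw [pvA_eq_map, pvB_eq]
    have htn : ((m' : Int)).toNat = m' := Int.toNat_natCast m'
    rw [htn]
    rw [PySem.List.pyRange_zero_natCast, List.map_map]
    apply List.ext_getElem
    · simp only [List.length_map, List.length_range, hfold.1, List.length_replicate]
    · intro p hp1 hp2
      have hpm' : p < m' := by simpa using hp1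
      -- the segment of part p
      obtain ⟨haN, hbN, hab, hcl, hci, hcg⟩ :=
        pvClassFacts m' (nums.length / m') nums.length p hm1' hs1 hsm hpm'
      have hseg := pvFilterInterval nums (pvPF nums (m' : Int)) p
        (p * (nums.length / m'))
        (if p + 1 = m' then nums.length else (p + 1) * (nums.length / m'))
        haN hbN (le_of_lt hab)
        (fun k hk => by
          rw [hpf k (by omega), beq_eq_false_iff_ne]
          exact fun h => hcl k hk (by exact_mod_cast h))
        (fun k hk1 hk2 hk3 => by
          rw [hpf k hk3, beq_iff_eq]
          exact_mod_cast hci k hk1 hk2)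
        (fun k hk1 hk2 => by
          rw [hpf k hk2, beq_eq_false_iff_ne]
          exact fun h => hcg k hk1 hk2 (by exact_mod_cast h))
      -- B side
      have hq := hfold.2 p (by simpa using hpm')
      have hgetd : (List.replicate m' (none : Option (Int × Int))).getD p none = none := by
        simp [List.getD_eq_getElem?_getD, hpm']
      rw [hgetd, hseg] at hq
      -- the segment is nonempty
      have hsegne : (nums.drop (p * (nums.length / m'))).take
          ((if p + 1 = m' then nums.length else (p + 1) * (nums.length / m')) -
            p * (nums.length / m')) ≠ [] := by
        apply List.ne_nil_of_length_pos
        simp only [List.length_take, List.length_drop]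
        omega
      rw [pvBSeg0 _ _ hsegne] at hq
      -- first minimum of the segment exists
      obtain ⟨⟨v, j⟩, hfm⟩ : ∃ q, pvFirstMin ((nums.drop (p * (nums.length / m'))).take
          ((if p + 1 = m' then nums.length else (p + 1) * (nums.length / m')) -
            p * (nums.length / m'))) = some q := by
        rcases h : pvFirstMin _ with _ | q
        · exact absurd ((pvFirstMin_eq_none _).mp h) hsegne
        · exact ⟨q, rfl⟩
      obtain ⟨hminv, hidxv⟩ := pvASeg _ v j hfm
      rw [hfm] at hq
      -- evaluate both getElems
      simp only [List.getElem_map, List.getElem_range]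
      -- B value
      have hBlen : p < ((PySem.List.enumerate nums 0).foldl (pvStep (pvPF nums (m' : Int)))
          (List.replicate m' none)).length := by
        rw [hfold.1, List.length_replicate]; exact hpm'
      rw [← List.getD_eq_getElem _ none hBlen, hq]
      -- A value: identify the slice with the segment
      simp only [Function.comp_apply, pvGA]
      rw [hps]
      have hsliceq : PySem.List.slice nums (some ((p : Int) * ((nums.length / m' : Nat) : Int)))
          (some (if (p : Int) < (m' : Int) - 1
                 then (p : Int) * ((nums.length / m' : Nat) : Int) + ((nums.length / m' : Nat) : Int)
                 else (nums.length : Int))) =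
          (nums.drop (p * (nums.length / m'))).take
            ((if p + 1 = m' then nums.length else (p + 1) * (nums.length / m')) -
              p * (nums.length / m')) := by
        have hcond : ((p : Int) < (m' : Int) - 1) ↔ ¬ (p + 1 = m') := by
          constructor <;> intro h <;> omega
        by_cases h : p + 1 = m'
        · rw [if_neg (by rw [hcond]; exact fun hh => hh h), if_pos h]
          rw [show ((p : Int) * ((nums.length / m' : Nat) : Int)) =
              ((p * (nums.length / m') : Nat) : Int) by push_cast; ring]
          rw [PySem.List.slice_natCast]
        · rw [if_pos (hcond.mpr h), if_neg h]
          rw [show ((p : Int) * ((nums.length / m' : Nat) : Int) +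
              ((nums.length / m' : Nat) : Int)) = (((p + 1) * (nums.length / m') : Nat) : Int) by
            push_cast [Nat.succ_mul]; ring]
          rw [show ((p : Int) * ((nums.length / m' : Nat) : Int)) =
              ((p * (nums.length / m') : Nat) : Int) by push_cast; ring]
          rw [PySem.List.slice_natCast]
      rw [hsliceq, hminv]
      simp only [Option.bind_some] at *
      rw [hidxv]
      -- both sides are ↑(p*s) + ↑j
      simp only [pvFB, Option.map_some, Option.getD_some]
      push_cast
      ring
  · -- corner: negative num_parts with empty nums — both return []
    subst hnil
    rw [pvA_eq_map, pvB_eq]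
    have hr : PySem.List.pyRange 0 num_parts 1 = [] := by
      simp [PySem.List.pyRange]; omega
    rw [hr]
    simp [PySem.List.enumerate_nil, Int.toNat_of_nonpos (le_of_lt hneg)]
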